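-- pv_equiv track=rewrite | github.com/the-deep/deep-experiments | scripts/training/selim/entry_classification/MultitaskAllInOne/utils.py | get_preds_entry
-- ===== SOURCE A (Python) =====
-- def get_preds_entry(preds_column, return_at_least_one=True, ratio_nb=1):
--     preds_entry = [
--         sub_tag
--         for sub_tag in list(preds_column.keys())
--         if preds_column[sub_tag] > ratio_nb
--     ]
--     if return_at_least_one:
--         if len(preds_entry) == 0:
--             preds_entry = [
--                 sub_tag
--                 for sub_tag in list(preds_column.keys())
--                 if preds_column[sub_tag] == max(list(preds_column.values()))
--             ]
--     return preds_entry
-- ===== SOURCE B (Python) =====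
-- def get_preds_entry(preds_column, return_at_least_one=True, ratio_nb=1):
--     above = []
--     best_val = None
--     best_keys = []
--     for k, v in preds_column.items():
--         if v > ratio_nb:
--             above.append(k)
--         if best_val is None or v > best_val:
--             best_val = v
--             best_keys = [k]
--         elif v == best_val:
--             best_keys.append(k)
--     if above:
--         return above
--     if return_at_least_one:
--         return best_keys
--     return []
-- ===== Notes on version B (the rewrite author's own statement) =====
-- stated objective: alternative
-- what changed: One streaming pass over items() that builds the above-threshold list and simultaneously tracks the running maximum and its tied keys, replacing A's two key-list comprehensions with per-key dict lookups and a max(values) recomputed inside the fallback comprehension's condition.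
import Mathlib
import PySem

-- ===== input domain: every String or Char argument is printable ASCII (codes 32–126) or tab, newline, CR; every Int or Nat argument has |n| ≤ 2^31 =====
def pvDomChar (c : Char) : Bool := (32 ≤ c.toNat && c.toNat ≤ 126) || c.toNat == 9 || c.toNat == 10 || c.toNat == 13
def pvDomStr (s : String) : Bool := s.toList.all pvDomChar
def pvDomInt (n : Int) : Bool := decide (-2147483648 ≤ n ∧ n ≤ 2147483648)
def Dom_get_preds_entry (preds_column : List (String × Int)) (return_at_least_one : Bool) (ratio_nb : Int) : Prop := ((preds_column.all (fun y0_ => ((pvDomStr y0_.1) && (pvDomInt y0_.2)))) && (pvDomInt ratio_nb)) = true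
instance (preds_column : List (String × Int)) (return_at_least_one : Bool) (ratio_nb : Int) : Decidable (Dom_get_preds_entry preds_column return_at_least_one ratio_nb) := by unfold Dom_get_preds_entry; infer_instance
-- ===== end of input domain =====

-- B replaces A's comprehensions over the key list (with a dict lookup per key, and max(values)
-- re-evaluated inside the fallback condition for every key) by one streaming pass over items()
-- that tracks the above-threshold keys together with the running maximum and its tied keys.

-- ===== PORT A =====
def get_preds_entry (preds_column : List (String × Int)) (return_at_least_one : Bool) (ratio_nb : Int) : List String :=
  let d := PySem.Dict.mk preds_column
  let preds_entry := d.keys.filter (fun sub_tag => (d.get? sub_tag).getD 0 > ratio_nb)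
  if return_at_least_one then
    if preds_entry.length = 0 then
      -- Python recomputes max(list(preds_column.values())) inside the condition; on an empty dict
      -- the comprehension is empty so max([]) is never evaluated — modelled by the Option compare.
      d.keys.filter (fun sub_tag =>
        some ((d.get? sub_tag).getD 0) == PySem.List.max? d.values (fun y => y))
    else preds_entry
  else preds_entry

-- ===== PORT B =====
-- loop body of Source B: state = (above, best_val, best_keys)
def altStep (ratio_nb : Int) (st : List String × Option Int × List String) (kv : String × Int) :
    List String × Option Int × List String :=
  let above := if kv.2 > ratio_nb then st.1 ++ [kv.1] else st.1
  match st.2.1 with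
  | none => (above, some kv.2, [kv.1])
  | some b =>
    if kv.2 > b then (above, some kv.2, [kv.1])
    else if kv.2 == b then (above, some b, st.2.2 ++ [kv.1])
    else (above, some b, st.2.2)

def get_preds_entry_alt (preds_column : List (String × Int)) (return_at_least_one : Bool) (ratio_nb : Int) : List String :=
  let s := preds_column.foldl (altStep ratio_nb) ([], none, [])
  if s.1 ≠ [] then s.1
  else if return_at_least_one then s.2.2
  else []

-- ===== PRECONDITION & SPEC =====
-- Pre_ excludes association lists with duplicate keys: a Python dict cannot contain them, so on such
-- lists the value of A (which collapses duplicates, last value winning) is an artefact of the encoding.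
def Pre_get_preds_entry (preds_column : List (String × Int)) (return_at_least_one : Bool) (ratio_nb : Int) : Prop :=
  (preds_column.map Prod.fst).Nodup
instance (preds_column : List (String × Int)) (return_at_least_one : Bool) (ratio_nb : Int) : Decidable (Pre_get_preds_entry preds_column return_at_least_one ratio_nb) := by unfold Pre_get_preds_entry; infer_instance

def pvWitness_get_preds_entry : (List (String × Int)) × Bool × Int := ([("a", 2), ("b", 0)], true, 1)

def Spec_get_preds_entry (preds_column : List (String × Int)) (return_at_least_one : Bool) (ratio_nb : Int) (out : List String) : Prop := out = get_preds_entry_alt preds_column return_at_least_one ratio_nb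
instance (preds_column : List (String × Int)) (return_at_least_one : Bool) (ratio_nb : Int) (out : List String) : Decidable (Spec_get_preds_entry preds_column return_at_least_one ratio_nb out) := by unfold Spec_get_preds_entry; infer_instance

-- ===== CLAIM (what is proved, stated in full; the proofs are below) =====
def Claim_equal_get_preds_entry : Prop := ∀ (preds_column : List (String × Int)) (return_at_least_one : Bool) (ratio_nb : Int), Dom_get_preds_entry preds_column return_at_least_one ratio_nb → Pre_get_preds_entry preds_column return_at_least_one ratio_nb → Spec_get_preds_entry preds_column return_at_least_one ratio_nb (get_preds_entry preds_column return_at_least_one ratio_nb)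

-- ===== LEMMAS AND PROOFS =====

-- A's comprehension over keys with a lookup per key, on a nodup dict, is a filter on the pairs.
theorem filter_keys_mk (pc : List (String × Int)) (hnd : (pc.map Prod.fst).Nodup) (P : Int → Bool) :
    ((PySem.Dict.mk pc).keys.filter
        (fun k => P (((PySem.Dict.mk pc).get? k).getD 0))) =
    (pc.filter (fun kv => P kv.2)).map Prod.fst := by
  induction pc with
  | nil => rfl
  | cons hd tl ih =>
    obtain ⟨k, v⟩ := hd
    simp only [List.map_cons, List.nodup_cons] at hnd
    have hk : ∀ x ∈ (PySem.Dict.mk tl).keys, ((PySem.Dict.mk ((k, v) :: tl)).get? x).getD 0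
        = ((PySem.Dict.mk tl).get? x).getD 0 := by
      intro x hx
      have hxk : ¬ (k == x) = true := by
        simp only [beq_iff_eq]
        rintro rfl
        exact hnd.1 (by simpa [PySem.Dict.keys] using hx)
      rw [PySem.Dict.get?_mk_cons]
      simp [hxk]
    have hkeys : (PySem.Dict.mk ((k, v) :: tl)).keys = k :: (PySem.Dict.mk tl).keys := by
      simp [PySem.Dict.keys]
    rw [hkeys, List.filter_cons]
    have hself : ((PySem.Dict.mk ((k, v) :: tl)).get? k).getD 0 = v := by
      rw [PySem.Dict.get?_mk_cons]; simp
    rw [List.filter_congr (fun x hx => by rw [hk x hx])]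
    rw [ih hnd.2]
    by_cases hP : P v = true
    · simp [hself, hP, List.filter_cons]
    · simp [hself, hP, List.filter_cons]

-- the `above` component of B's loop accumulates the keys above the threshold
theorem altStep_above (ratio_nb : Int) (pc : List (String × Int)) :
    ∀ (st : List String × Option Int × List String),
    (pc.foldl (altStep ratio_nb) st).1 =
      st.1 ++ (pc.filter (fun kv => kv.2 > ratio_nb)).map Prod.fst := by
  induction pc with
  | nil => intro st; simp
  | cons hd tl ih =>
    intro st
    obtain ⟨above, bv, bk⟩ := st
    obtain ⟨k, v⟩ := hd
    simp only [List.foldl_cons, List.filter_cons]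
    by_cases hv : v > ratio_nb
    · cases bv with
      | none => rw [ih]; simp [altStep, hv]
      | some b =>
        by_cases h1 : v > b
        · rw [ih]; simp [altStep, hv, h1]
        · by_cases h2 : v = b
          · rw [ih]; simp only [altStep, h1, h2]; split_ifs <;> simp_all <;> omega
          · rw [ih]; simp [altStep, hv, h1, h2]
    · cases bv with
      | none => rw [ih]; simp [altStep, hv]
      | some b =>
        by_cases h1 : v > b
        · rw [ih]; simp [altStep, hv, h1]
        · by_cases h2 : v = b
          · rw [ih]; simp only [altStep, h1, h2]; split_ifs <;> simp_all <;> omega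
          · rw [ih]; simp [altStep, hv, h1, h2]

theorem le_foldl_max' (l : List Int) : ∀ b : Int, b ≤ l.foldl max b := by
  induction l with
  | nil => intro b; simp
  | cons x t ih =>
    intro b
    exact le_trans (le_max_left b x) (ih (max b x))

-- the (best_val, best_keys) components: running max and its tied keys in order
theorem altStep_best (ratio_nb : Int) (pc : List (String × Int)) :
    ∀ (above bk : List String) (b : Int),
    (pc.foldl (altStep ratio_nb) (above, some b, bk)).2 =
      (some ((pc.map Prod.snd).foldl max b),
       (if b = (pc.map Prod.snd).foldl max b then bk else []) ++
         (pc.filter (fun kv => kv.2 = (pc.map Prod.snd).foldl max b)).map Prod.fst) := by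
  induction pc with
  | nil => intro above bk b; simp
  | cons hd tl ih =>
    intro above bk b
    obtain ⟨k, v⟩ := hd
    have hM : v ≤ (tl.map Prod.snd).foldl max (max b v) :=
      le_trans (le_max_right b v) (le_foldl_max' _ _)
    by_cases h1 : v > b
    · have hstep : altStep ratio_nb (above, some b, bk) (k, v) =
        ((if v > ratio_nb then above ++ [k] else above), some v, [k]) := by
        simp [altStep, h1]
      have hmax : max b v = v := by omega
      rw [hmax] at hM
      have hbM : ¬ b = (tl.map Prod.snd).foldl max v := by omega
      simp only [List.foldl_cons, hstep, ih]
      simp only [List.map_cons, List.foldl_cons, List.filter_cons, hmax]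
      by_cases hvM : v = (tl.map Prod.snd).foldl max v
      · rw [if_neg hbM, ← hvM]; simp
      · rw [if_neg hbM]; simp [hvM]
    · by_cases h2 : v = b
      · have hstep : altStep ratio_nb (above, some b, bk) (k, v) =
          ((if v > ratio_nb then above ++ [k] else above), some b, bk ++ [k]) := by
          simp [altStep, h1, h2]
        have hmax : max b v = b := by omega
        simp only [List.foldl_cons, hstep, ih]
        simp only [List.map_cons, List.foldl_cons, List.filter_cons, hmax]
        subst h2
        by_cases hvM : v = (tl.map Prod.snd).foldl max v
        · simp [← hvM]
        · simp [hvM]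
      · have hstep : altStep ratio_nb (above, some b, bk) (k, v) =
          ((if v > ratio_nb then above ++ [k] else above), some b, bk) := by
          simp [altStep, h1, h2]
        have hmax : max b v = b := by omega
        simp only [List.foldl_cons, hstep, ih]
        simp only [List.map_cons, List.foldl_cons, List.filter_cons, hmax]
        have hvM : ¬ v = (tl.map Prod.snd).foldl max b := by
          have := le_foldl_max' (tl.map Prod.snd) b; omega
        simp [hvM]

-- ===== VERDICT (by name: the statement is the Claim_ definition above) =====
theorem get_preds_entry_spec : Claim_equal_get_preds_entry := by
  intro pc r1 ratio _hdom hpre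
  unfold Spec_get_preds_entry get_preds_entry get_preds_entry_alt
  have hkeys : (PySem.Dict.mk pc).keys = pc.map Prod.fst := by simp [PySem.Dict.keys]
  have habove := altStep_above ratio pc ([], none, [])
  have hA1 := filter_keys_mk pc hpre (fun x => x > ratio)
  simp only [hkeys] at hA1
  by_cases hne : (pc.filter (fun kv => kv.2 > ratio)) = []
  · -- nothing above threshold
    simp only [hne, List.map_nil, List.append_nil] at hA1 habove
    simp only [hkeys, hA1, habove]
    simp only [List.length_nil, ne_eq, not_true_eq_false, if_false, if_true]
    cases r1 with
    | false => simp
    | true =>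
      simp only [if_true, if_pos rfl]
      cases pc with
      | nil => rfl
      | cons hd tl =>
        obtain ⟨k, v⟩ := hd
        -- A's fallback branch: keys whose value equals max(values)
        have hvals : (PySem.Dict.mk ((k, v) :: tl)).values = v :: tl.map Prod.snd := by
          simp [PySem.Dict.values]
        have hmax : PySem.List.max? (PySem.Dict.mk ((k, v) :: tl)).values (fun y => y)
            = some ((tl.map Prod.snd).foldl max v) := by
          rw [hvals, PySem.List.max?_id_cons]
        have hA2 := filter_keys_mk ((k, v) :: tl) hpre
          (fun x => x = (tl.map Prod.snd).foldl max v)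
        simp only [hkeys] at hA2
        have heq : ∀ x ∈ ((k, v) :: tl).map Prod.fst,
            (some (((PySem.Dict.mk ((k, v) :: tl)).get? x).getD 0) ==
              PySem.List.max? (PySem.Dict.mk ((k, v) :: tl)).values (fun y => y))
            = decide ((((PySem.Dict.mk ((k, v) :: tl)).get? x).getD 0 : Int)
                = (tl.map Prod.snd).foldl max v) := by
          intro x _
          rw [hmax]
          by_cases h : (((PySem.Dict.mk ((k, v) :: tl)).get? x).getD 0 : Int)
              = (tl.map Prod.snd).foldl max v
          · simp [h]
          · simp [h]
        rw [List.filter_congr heq, hA2]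
        -- B side: first step initialises (some v, [k]), then altStep_best
        have hstep1 : ((k, v) :: tl).foldl (altStep ratio) ([], none, []) =
            tl.foldl (altStep ratio)
              ((if v > ratio then ([] : List String) ++ [k] else []), some v, [k]) := by
          simp [altStep]
        rw [hstep1]
        have hbest := altStep_best ratio tl
          (if v > ratio then ([] : List String) ++ [k] else []) [k] v
        have h22 : (tl.foldl (altStep ratio)
            ((if v > ratio then ([] : List String) ++ [k] else []), some v, [k])).2.2
            = (if v = (tl.map Prod.snd).foldl max v then [k] else []) ++
              (tl.filter (fun kv => kv.2 = (tl.map Prod.snd).foldl max v)).map Prod.fst := by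
          rw [show (tl.foldl (altStep ratio)
              ((if v > ratio then ([] : List String) ++ [k] else []), some v, [k])).2.2
              = ((tl.foldl (altStep ratio)
              ((if v > ratio then ([] : List String) ++ [k] else []), some v, [k])).2).2 from rfl,
            hbest]
        rw [h22]
        simp only [List.filter_cons, List.map_cons]
        by_cases hvM : v = (tl.map Prod.snd).foldl max v
        · simp [← hvM]
        · simp [hvM]
  · -- some key above the threshold: both return the filtered list
    simp only [hkeys, hA1, habove]
    have hlen : ¬ ((pc.filter (fun kv => kv.2 > ratio)).map Prod.fst).length = 0 := by
      simp [hne]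
    simp only [List.nil_append, hlen, if_false, ne_eq]
    have hne' : ¬ ((pc.filter (fun kv => kv.2 > ratio)).map Prod.fst) = [] := by
      simp [hne]
    cases r1 <;> simp [hne']
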